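-- pv_equiv track=rewrite | github.com/TiberiuC39/TinyPedal | tinypedal/module/module_relative.py | split_class_list
-- ===== SOURCE A (Python) =====
-- def split_class_list(input_list):
--     """Split class list collection"""
--     class_name = input_list[0][2]
--     index_start = 0
--     index_end = 0
--     for vehicle in input_list:
--         if vehicle[2] == class_name:
--             index_end +=1
--         elif vehicle[2] != class_name:
--             class_name = vehicle[2]
--             yield input_list[index_start:index_end]
--             index_start = index_end
--             index_end +=1
--     # Final split
--     yield input_list[index_start:index_end]
-- ===== SOURCE B (Python) =====
-- from itertools import groupby
--
--
-- def split_class_list(input_list):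
--     """Split class list collection"""
--     for _, group in groupby(input_list, key=lambda vehicle: vehicle[2]):
--         yield list(group)
-- ===== Notes on version B (the rewrite author's own statement) =====
-- stated objective: idiomatic
-- what changed: Replaces A's hand-maintained class-name state and start/end slice indices with itertools.groupby, which collects each consecutive run of equal class key directly as a list.
import Mathlib
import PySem

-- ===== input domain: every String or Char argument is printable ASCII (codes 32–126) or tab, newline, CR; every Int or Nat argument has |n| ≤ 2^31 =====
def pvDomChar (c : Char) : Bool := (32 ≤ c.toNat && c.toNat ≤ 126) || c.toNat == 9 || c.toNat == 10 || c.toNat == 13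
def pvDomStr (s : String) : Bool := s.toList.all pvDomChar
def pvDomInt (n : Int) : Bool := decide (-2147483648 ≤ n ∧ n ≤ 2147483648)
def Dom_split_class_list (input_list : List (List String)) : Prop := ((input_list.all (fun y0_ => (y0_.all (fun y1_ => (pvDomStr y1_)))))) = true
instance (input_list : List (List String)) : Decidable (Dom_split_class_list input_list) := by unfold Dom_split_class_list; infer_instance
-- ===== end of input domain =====

-- B groups consecutive equal-class runs with a groupby-style span recursion instead of A's
-- hand-maintained class-name state and start/end slice indices (idiomatic; same O(n) cost).


-- ===== PORT A =====
-- vehicle[2], shared by both ports (Option: none = IndexError, excluded by Pre_)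
def pvKey (v : List String) : Option String := PySem.List.pyGet? v 2

-- one iteration of A's loop: state = (class_name, index_start, index_end, yielded slices)
def pvStepA (L : List (List String)) (st : Option String × Int × Int × List (List (List String)))
    (vehicle : List String) : Option String × Int × Int × List (List (List String)) :=
  if pvKey vehicle = st.1 then
    (st.1, st.2.1, st.2.2.1 + 1, st.2.2.2)
  else
    (pvKey vehicle, st.2.2.1, st.2.2.1 + 1,
      st.2.2.2 ++ [PySem.List.slice L (some st.2.1) (some st.2.2.1)])

def split_class_list (input_list : List (List String)) : List (List (List String)) :=
  let class_name := (PySem.List.pyGet? input_list 0).bind (fun v => PySem.List.pyGet? v 2)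
  let st := input_list.foldl (pvStepA input_list) (class_name, 0, 0, [])
  st.2.2.2 ++ [PySem.List.slice input_list (some st.2.1) (some st.2.2.1)]

-- ===== PORT B =====
-- itertools.groupby: peel off the maximal run of the head's key, recurse on the remainder
def split_class_list_alt : List (List String) → List (List (List String))
  | [] => []
  | x :: xs =>
    (x :: xs.takeWhile (fun v => pvKey v == pvKey x)) ::
      split_class_list_alt (xs.dropWhile (fun v => pvKey v == pvKey x))
termination_by l => l.length
decreasing_by
  exact Nat.lt_succ_of_le (List.length_dropWhile_le _ _)

-- ===== PRECONDITION & SPEC =====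
-- Pre_ excludes exactly the inputs where Python A raises IndexError: the empty list
-- (input_list[0]) and any row shorter than 3 entries (vehicle[2]).
def Pre_split_class_list (input_list : List (List String)) : Prop :=
  input_list ≠ [] ∧ ∀ v ∈ input_list, 3 ≤ v.length
instance (input_list : List (List String)) : Decidable (Pre_split_class_list input_list) := by
  unfold Pre_split_class_list; infer_instance

def pvWitness_split_class_list : List (List String) :=
  [["1", "Alpha", "GT3"], ["2", "Beta", "GT3"], ["3", "Gamma", "LMP2"]]

def Spec_split_class_list (input_list : List (List String)) (out : List (List (List String))) : Prop := out = split_class_list_alt input_list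
instance (input_list : List (List String)) (out : List (List (List String))) : Decidable (Spec_split_class_list input_list out) := by unfold Spec_split_class_list; infer_instance

-- ===== CLAIM (what is proved, stated in full; the proofs are below) =====
def Claim_equal_split_class_list : Prop := ∀ (input_list : List (List String)), Dom_split_class_list input_list → Pre_split_class_list input_list → Spec_split_class_list input_list (split_class_list input_list)

-- ===== LEMMAS AND PROOFS =====

-- Invariant for A's loop: after the first `is` elements (the already-yielded groups) and the
-- current run `run` (nonempty, all of class `cn`), folding A's step over the remaining `rest`
-- and appending the final slice produces exactly `acc` followed by B's grouping of run++rest.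
lemma pv_loopA (L : List (List String)) (rest : List (List String)) :
    ∀ (cn : Option String) (run : List (List String)) (acc : List (List (List String))) (is : Nat),
      run ≠ [] → (∀ v ∈ run, pvKey v = cn) →
      L.drop is = run ++ rest →
      (let st := rest.foldl (pvStepA L) (cn, (is : Int), ((is : Int) + (run.length : Int)), acc)
       st.2.2.2 ++ [PySem.List.slice L (some st.2.1) (some st.2.2.1)])
      = acc ++ ((run ++ rest.takeWhile (fun v => pvKey v == cn)) ::
          split_class_list_alt (rest.dropWhile (fun v => pvKey v == cn))) := by
  induction rest with
  | nil =>
    intro cn run acc is _ _ hdrop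
    simp only [List.foldl_nil, List.takeWhile_nil, List.dropWhile_nil, split_class_list_alt,
      List.append_nil]
    rw [PySem.List.slice_natCast_add, hdrop, List.append_nil, List.take_length]
  | cons y ys ih =>
    intro cn run acc is hne hrun hdrop
    by_cases h : pvKey y = cn
    · -- same class: the run extends
      simp only [List.foldl_cons, pvStepA, List.takeWhile_cons, List.dropWhile_cons,
        h, beq_self_eq_true, if_true]
      have hdrop' : L.drop is = (run ++ [y]) ++ ys := by
        rw [hdrop]; simp
      have := ih cn (run ++ [y]) acc is (by simp) (by
        intro v hv
        rcases List.mem_append.mp hv with hv | hv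
        · exact hrun v hv
        · simp at hv; subst hv; exact h) hdrop'
      have harith : (is : Int) + (run.length : Int) + 1 = (is : Int) + ((run ++ [y]).length : Int) := by
        simp only [List.length_append, List.length_cons, List.length_nil]
        push_cast
        ring
      rw [harith]
      rw [this]
      simp
    · -- class change: yield the current run, start a new one at y
      have hb : (pvKey y == cn) = false := by simp [h]
      simp only [List.foldl_cons, pvStepA, if_neg h, List.takeWhile_cons, List.dropWhile_cons, hb,
        Bool.false_eq_true, if_false]
      have hdrop2 : L.drop (is + run.length) = [y] ++ ys := by
        rw [← List.drop_drop, hdrop, List.drop_append_of_le_length (le_refl _)]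
        simp
      have hslice : PySem.List.slice L (some (is : Int)) (some ((is : Int) + (run.length : Int))) = run := by
        rw [PySem.List.slice_natCast_add, hdrop]
        exact List.take_left' rfl
      have harith2 : (is : Int) + (run.length : Int) = ((is + run.length : Nat) : Int) := by push_cast; ring
      have harith3 : (is : Int) + (run.length : Int) + 1
          = ((is + run.length : Nat) : Int) + (([y] : List (List String)).length : Int) := by
        simp
      have := ih (pvKey y) [y] (acc ++ [run]) (is + run.length) (by simp)
        (by intro v hv; simp at hv; subst hv; rfl) hdrop2
      rw [hslice, harith3, harith2, this]
      simp only [split_class_list_alt, List.append_assoc, List.cons_append, List.nil_append,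
        List.append_nil, List.singleton_append]

-- ===== VERDICT (by name: the statement is the Claim_ definition above) =====
theorem split_class_list_spec : Claim_equal_split_class_list := by
  intro input_list _ hpre
  unfold Spec_split_class_list
  obtain ⟨hne, _⟩ := hpre
  cases input_list with
  | nil => exact absurd rfl hne
  | cons x xs =>
    show (let st := (x :: xs).foldl (pvStepA (x :: xs)) (_, 0, 0, []);
      st.2.2.2 ++ [PySem.List.slice (x :: xs) (some st.2.1) (some st.2.2.1)]) = _
    have hcn : (PySem.List.pyGet? (x :: xs) 0).bind (fun v => PySem.List.pyGet? v 2) = pvKey x := by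
      simp [pvKey]
    have hstep : pvStepA (x :: xs) (pvKey x, 0, 0, []) x = (pvKey x, 0, 1, []) := by
      simp [pvStepA]
    have h := pv_loopA (x :: xs) xs (pvKey x) [x] [] 0 (by simp)
      (by intro v hv; simp at hv; subst hv; rfl) (by simp)
    simp only [hcn, List.foldl_cons, hstep]
    simp only [Nat.cast_zero, List.length_cons, List.length_nil,
      Nat.cast_one, zero_add, List.nil_append] at h
    rw [h]
    simp [split_class_list_alt]
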